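-- pv_equiv track=rewrite | github.com/ODiogoSilva/TriFusion | ortho/orthomcl_toolbox_old.py | fetch_outgroups
-- ===== SOURCE A (Python) =====
-- def fetch_outgroups (Basidio_dic, Complete_dic, groups_key, outgroups):
-- 	""" This function fetches the required outgroups from their corresponding groups in the Complete_dic to the Basidio_dic """
-- 	groups_key_inv = dict((values,key) for key, values in groups_key.items())
-- 	for taxa in outgroups:
-- 		for group in Basidio_dic:
-- 			if group in groups_key_inv.keys():
-- 				complete_group = groups_key_inv[group]
-- 				complete_prots = Complete_dic[complete_group].split()
-- 				outgroup_seq = [seq for seq in complete_prots if taxa in seq]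
-- 				if outgroup_seq != []:
-- 					outgroup_seq = "".join(outgroup_seq[0])
-- 					basidio_prots = Basidio_dic[group].split()
-- 					basidio_prots.append(outgroup_seq)
-- 					basidio_prots.append("\n")
-- 					Basidio_dic[group] = " ".join(basidio_prots)
-- 	return Basidio_dic
-- ===== SOURCE B (Python) =====
-- def fetch_outgroups(Basidio_dic, Complete_dic, groups_key, outgroups):
--     """Fetch the required outgroups from Complete_dic into the basidio groups.
--     Staged: first build, per basidio group (driven by groups_key, not by the
--     basidio dict), the ordered list of matched outgroup sequences; then rewrite
--     Basidio_dic's values in one comprehension.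
--     Equivalence is about the RETURN value (A mutates Basidio_dic in place)."""
--     additions = {}
--     for complete_group, basidio_group in groups_key.items():
--         prots = Complete_dic.get(complete_group, "").split()
--         hits = []
--         for taxa in outgroups:
--             for p in prots:
--                 if taxa in p:
--                     hits.append(p)
--                     break
--         additions[basidio_group] = hits
--     return {g: (" ".join(v.split() + additions[g] + ["\n"]) if additions.get(g) else v)
--             for g, v in Basidio_dic.items()}
-- ===== Notes on version B (the rewrite author's own statement) =====
-- stated objective: faster
-- what changed: B is staged: a first pass over groups_key (no inverted dict) precomputes per basidio group the ordered list of matched outgroup sequences (one split of each complete group, first hit per taxon found with an inner break), then a single dict comprehension over Basidio_dic does one split/join per group; A instead loops taxa-outer over all groups, re-splitting and re-joining each group's growing string once per taxon. Equivalence is about the RETURN value (A mutates Basidio_dic in place, B builds a new dict).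
import Mathlib
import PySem

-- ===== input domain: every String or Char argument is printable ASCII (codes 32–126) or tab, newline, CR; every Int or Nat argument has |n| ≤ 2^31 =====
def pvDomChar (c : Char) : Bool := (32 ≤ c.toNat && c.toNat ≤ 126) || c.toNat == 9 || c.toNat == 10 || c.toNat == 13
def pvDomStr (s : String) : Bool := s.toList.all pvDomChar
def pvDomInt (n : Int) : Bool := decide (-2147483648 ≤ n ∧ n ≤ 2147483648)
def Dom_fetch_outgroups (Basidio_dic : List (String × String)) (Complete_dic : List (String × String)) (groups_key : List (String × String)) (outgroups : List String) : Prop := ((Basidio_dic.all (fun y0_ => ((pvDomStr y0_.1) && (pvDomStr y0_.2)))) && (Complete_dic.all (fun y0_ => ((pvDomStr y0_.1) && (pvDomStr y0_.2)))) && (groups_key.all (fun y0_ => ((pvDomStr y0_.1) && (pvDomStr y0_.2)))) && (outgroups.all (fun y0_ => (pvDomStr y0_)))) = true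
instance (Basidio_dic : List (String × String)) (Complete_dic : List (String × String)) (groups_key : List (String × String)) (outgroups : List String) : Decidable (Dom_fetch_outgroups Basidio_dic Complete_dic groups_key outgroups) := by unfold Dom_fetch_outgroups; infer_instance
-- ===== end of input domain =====

-- B is staged: one pass over groups_key precomputes each basidio group's matched outgroup
-- sequences, then a single comprehension over Basidio_dic does one split/join per group,
-- instead of A's taxa-outer re-split/re-join of each group once per taxon; equivalence is
-- about the RETURN value (Python A mutates Basidio_dic in place, Python B builds a new dict).

-- ===== PORT A =====
def fetch_outgroups (Basidio_dic : List (String × String)) (Complete_dic : List (String × String)) (groups_key : List (String × String)) (outgroups : List String) : List (String × String) :=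
  let inv : PySem.Dict String String :=
    PySem.Dict.ofList ((PySem.Dict.ofList groups_key).items.map (fun kv => (kv.2, kv.1)))
  let cd : PySem.Dict String String := PySem.Dict.ofList Complete_dic
  (outgroups.foldl (fun bd taxa =>
      bd.keys.foldl (fun bd' group =>
        match inv.get? group with
        | none => bd'
        | some complete_group =>
          match cd.get? complete_group with
          | none => bd'   -- Python raises KeyError here; excluded by Pre_fetch_outgroups
          | some cstr =>
            let complete_prots := PySem.Str.split₀ cstr
            let outgroup_seq := complete_prots.filter (fun seq => PySem.Str.isIn taxa seq)
            if outgroup_seq = [] then bd'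
            else bd'.insert group
              (PySem.Str.join " " (PySem.Str.split₀ (bd'.getD group "") ++ [outgroup_seq.headD "", "\n"]))) bd)
    (PySem.Dict.ofList Basidio_dic)).items

-- ===== PORT B =====
-- Source B's inner "for p in prots: if taxa in p: hits.append(p); break" loop over the taxa
def pvCollectHits (prots : List String) (outgroups : List String) : List String :=
  outgroups.foldl (fun hits taxa =>
    match prots.find? (fun p => PySem.Str.isIn taxa p) with
    | some p => hits ++ [p]
    | none => hits) []

def fetch_outgroups_alt (Basidio_dic : List (String × String)) (Complete_dic : List (String × String)) (groups_key : List (String × String)) (outgroups : List String) : List (String × String) :=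
  let cd : PySem.Dict String String := PySem.Dict.ofList Complete_dic
  let additions : PySem.Dict String (List String) :=
    (PySem.Dict.ofList groups_key).items.foldl (fun add kv =>
      add.insert kv.2 (pvCollectHits (PySem.Str.split₀ (cd.getD kv.1 "")) outgroups))
      PySem.Dict.empty
  (PySem.Dict.ofList Basidio_dic).items.map (fun gv =>
    (gv.1,
      match additions.get? gv.1 with
      | some (h :: t) => PySem.Str.join " " (PySem.Str.split₀ gv.2 ++ (h :: t) ++ ["\n"])
      | _ => gv.2))

-- ===== PRECONDITION & SPEC =====
-- Python A raises KeyError iff outgroups is non-empty and some basidio group maps, through the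
-- inverted groups_key dict, to a complete group absent from Complete_dic; Pre_ excludes exactly that.
def Pre_fetch_outgroups (Basidio_dic : List (String × String)) (Complete_dic : List (String × String)) (groups_key : List (String × String)) (outgroups : List String) : Prop :=
  outgroups = [] ∨
    ∀ p ∈ Basidio_dic,
      ((PySem.Dict.ofList ((PySem.Dict.ofList groups_key).items.map (fun kv => (kv.2, kv.1)))).get? p.1).all
        (fun cg => (PySem.Dict.ofList Complete_dic).contains cg) = true
instance (Basidio_dic : List (String × String)) (Complete_dic : List (String × String)) (groups_key : List (String × String)) (outgroups : List String) : Decidable (Pre_fetch_outgroups Basidio_dic Complete_dic groups_key outgroups) := by unfold Pre_fetch_outgroups; infer_instance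

def pvWitness_fetch_outgroups : (List (String × String)) × (List (String × String)) × (List (String × String)) × List String :=
  ([("g1", "A1 B1"), ("g2", "C1")], [("c1", "Out1_x Out2_y")], [("c1", "g1")], ["Out1", "Out2"])

def Spec_fetch_outgroups (Basidio_dic : List (String × String)) (Complete_dic : List (String × String)) (groups_key : List (String × String)) (outgroups : List String) (out : List (String × String)) : Prop := out = fetch_outgroups_alt Basidio_dic Complete_dic groups_key outgroups
instance (Basidio_dic : List (String × String)) (Complete_dic : List (String × String)) (groups_key : List (String × String)) (outgroups : List String) (out : List (String × String)) : Decidable (Spec_fetch_outgroups Basidio_dic Complete_dic groups_key outgroups out) := by unfold Spec_fetch_outgroups; infer_instance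

-- ===== CLAIM (what is proved, stated in full; the proofs are below) =====
def Claim_equal_fetch_outgroups : Prop := ∀ (Basidio_dic : List (String × String)) (Complete_dic : List (String × String)) (groups_key : List (String × String)) (outgroups : List String), Dom_fetch_outgroups Basidio_dic Complete_dic groups_key outgroups → Pre_fetch_outgroups Basidio_dic Complete_dic groups_key outgroups → Spec_fetch_outgroups Basidio_dic Complete_dic groups_key outgroups (fetch_outgroups Basidio_dic Complete_dic groups_key outgroups)
-- ===== LEMMAS AND PROOFS =====

theorem pv_go_nonspace (w : List Char) (h : ∀ c ∈ w, PySem.Chars.isspace c = false) :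
    ∀ (rest cur acc), PySem.Chars.split₀.go (w ++ rest) cur acc = PySem.Chars.split₀.go rest (w.reverse ++ cur) acc := by
  induction w with
  | nil => intro rest cur acc; simp
  | cons c w ih =>
    intro rest cur acc
    have hc : PySem.Chars.isspace c = false := h c (by simp)
    have hw : ∀ c ∈ w, PySem.Chars.isspace c = false := fun c hcm => h c (by simp [hcm])
    rw [List.cons_append]
    rw [show PySem.Chars.split₀.go (c :: (w ++ rest)) cur acc = PySem.Chars.split₀.go (w ++ rest) (c :: cur) acc by
      simp [PySem.Chars.split₀.go, hc]]
    rw [ih hw rest (c :: cur) acc]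
    simp

theorem pv_go_good :
    ∀ (s cur acc : _), (∀ c ∈ cur, PySem.Chars.isspace c = false) →
      (∀ w ∈ acc, w ≠ [] ∧ ∀ c ∈ w, PySem.Chars.isspace c = false) →
      ∀ w ∈ PySem.Chars.split₀.go s cur acc, w ≠ [] ∧ ∀ c ∈ w, PySem.Chars.isspace c = false := by
  intro s
  induction s with
  | nil =>
    intro cur acc hcur hacc w hw
    by_cases hce : cur.isEmpty
    · simp [PySem.Chars.split₀.go, hce] at hw
      exact hacc w hw
    · simp [PySem.Chars.split₀.go, hce] at hw
      rcases hw with h1 | h2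
      · exact hacc w h1
      · subst h2
        refine ⟨by simpa [List.isEmpty_iff] using hce, ?_⟩
        intro c hcm; exact hcur c (by simpa using hcm)
  | cons c s ih =>
    intro cur acc hcur hacc w hw
    by_cases hc : PySem.Chars.isspace c
    · by_cases hce : cur.isEmpty
      · simp only [PySem.Chars.split₀.go, hc, hce, if_true] at hw
        exact ih [] acc (by simp) hacc w hw
      · simp only [PySem.Chars.split₀.go, hc, hce, if_true] at hw
        refine ih [] (cur.reverse :: acc) (by simp) ?_ w hw
        intro w' hw'
        rcases List.mem_cons.mp hw' with h1 | h2
        · subst h1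
          refine ⟨by simpa [List.isEmpty_iff] using hce, ?_⟩
          intro c' hcm; exact hcur c' (by simpa using hcm)
        · exact hacc w' h2
    · simp only [PySem.Chars.split₀.go, hc] at hw
      refine ih (c :: cur) acc ?_ hacc w hw
      intro c' hcm
      rcases List.mem_cons.mp hcm with h1 | h2
      · subst h1; simpa using hc
      · exact hcur c' h2

def pvGoodW (w : String) : Prop := w.toList ≠ [] ∧ ∀ c ∈ w.toList, PySem.Chars.isspace c = false

theorem pv_split₀_good (s : String) : ∀ w ∈ PySem.Str.split₀ s, pvGoodW w := by
  intro w hw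
  have : w.toList ∈ PySem.Chars.split₀ s.toList := by
    rw [← PySem.Str.split₀_map_toList]
    exact List.mem_map_of_mem hw
  exact pv_go_good s.toList [] [] (by simp) (by simp) w.toList this

-- intercalate split helpers
theorem pv_inter_cons (x y : List Char) (l : List (List Char)) :
    [' '].intercalate (x :: y :: l) = x ++ ' ' :: [' '].intercalate (y :: l) := by
  simp [List.intercalate, List.intersperse]

theorem pv_inter_append_single (l : List (List Char)) (hne : l ≠ []) (x : List Char) :
    [' '].intercalate (l ++ [x]) = [' '].intercalate l ++ ' ' :: x := by
  induction l with
  | nil => simp at hne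
  | cons a l ih =>
    cases l with
    | nil => simp [List.intercalate]
    | cons b l =>
      rw [show (a :: b :: l ++ [x]) = a :: b :: (l ++ [x]) by simp]
      rw [pv_inter_cons]
      rw [show (b :: (l ++ [x])) = (b :: l) ++ [x] by simp]
      rw [ih (by simp), pv_inter_cons]
      simp

theorem pv_go_space_cons (rest cur : List Char) (hcur : cur ≠ []) (acc : List (List Char)) :
    PySem.Chars.split₀.go (' ' :: rest) cur acc = PySem.Chars.split₀.go rest [] (cur.reverse :: acc) := by
  simp [PySem.Chars.split₀.go, show PySem.Chars.isspace ' ' = true by decide, List.isEmpty_iff, hcur]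

theorem pv_goJoin : ∀ (ws : List (List Char)), ws ≠ [] →
    (∀ w ∈ ws, w ≠ [] ∧ ∀ c ∈ w, PySem.Chars.isspace c = false) →
    ∀ acc, PySem.Chars.split₀.go ([' '].intercalate ws ++ [' ', '\n']) [] acc = acc.reverse ++ ws := by
  intro ws
  induction ws with
  | nil => intro h; simp at h
  | cons w ws ih =>
    intro _ hgood acc
    have hw := hgood w (by simp)
    have hwr : w.reverse ++ [] ≠ [] := by simp [hw.1]
    cases ws with
    | nil =>
      rw [show [' '].intercalate [w] = w by simp [List.intercalate]]
      rw [pv_go_nonspace w hw.2]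
      rw [show ([' ', '\n'] : List Char) = ' ' :: ['\n'] from rfl]
      rw [pv_go_space_cons _ _ hwr]
      simp [PySem.Chars.split₀.go, show PySem.Chars.isspace '\n' = true by decide]
    | cons y ws' =>
      rw [pv_inter_cons, List.append_assoc, pv_go_nonspace w hw.2, List.cons_append]
      rw [pv_go_space_cons _ _ hwr]
      rw [ih (by simp) (fun w' h' => hgood w' (by simp [h'])) _]
      simp

theorem pv_resplit (ws : List String) (hne : ws ≠ []) (h : ∀ w ∈ ws, pvGoodW w) :
    PySem.Str.split₀ (PySem.Str.join " " (ws ++ ["\n"])) = ws := by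
  have hinj : Function.Injective (List.map String.toList) :=
    List.map_injective_iff.mpr (fun a b => String.toList_injective)
  apply hinj
  rw [PySem.Str.split₀_map_toList, PySem.Str.toList_join]
  have h1 : (" " : String).toList = [' '] := rfl
  have h2 : List.map String.toList (ws ++ ["\n"]) = List.map String.toList ws ++ [['\n']] := by simp
  rw [h1, h2]
  have hne' : List.map String.toList ws ≠ [] := by simpa using hne
  rw [show PySem.Chars.join [' '] (List.map String.toList ws ++ [['\n']])
      = [' '].intercalate (List.map String.toList ws ++ [['\n']]) from rfl]
  rw [pv_inter_append_single _ hne']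
  rw [show ([' '].intercalate (List.map String.toList ws) ++ ' ' :: ['\n'])
      = [' '].intercalate (List.map String.toList ws) ++ [' ', '\n'] from rfl]
  rw [show PySem.Chars.split₀ ([' '].intercalate (List.map String.toList ws) ++ [' ', '\n'])
      = PySem.Chars.split₀.go ([' '].intercalate (List.map String.toList ws) ++ [' ', '\n']) [] [] from rfl]
  rw [pv_goJoin _ hne' ?_ []]
  · simp
  · intro w hw
    rcases List.mem_map.mp hw with ⟨w', hw', rfl⟩
    exact ⟨(h w' hw').1, (h w' hw').2⟩

theorem pv_foldl_step (prots : List String) (hg : ∀ w ∈ prots, pvGoodW w) :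
    ∀ (O : List String) (u : String),
      O.foldl (fun v t =>
        if prots.filter (fun s => PySem.Str.isIn t s) = [] then v
        else PySem.Str.join " " (PySem.Str.split₀ v ++ [(prots.filter (fun s => PySem.Str.isIn t s)).headD "", "\n"])) u
      = (if O.filterMap (fun t => (prots.filter (fun s => PySem.Str.isIn t s)).head?) = [] then u
         else PySem.Str.join " " (PySem.Str.split₀ u ++ O.filterMap (fun t => (prots.filter (fun s => PySem.Str.isIn t s)).head?) ++ ["\n"])) := by
  intro O
  induction O with
  | nil => intro u; simp
  | cons t O ih =>
    intro u
    rw [List.foldl_cons, List.filterMap_cons]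
    cases hft : prots.filter (fun s => PySem.Str.isIn t s) with
    | nil => simp only [List.head?_nil, if_true]; exact ih u
    | cons s rest =>
      have hs : s ∈ prots := List.mem_of_mem_filter (hft ▸ List.mem_cons_self ..)
      have hsg : pvGoodW s := hg s hs
      simp only [List.head?_cons, reduceCtorEq, if_false]
      set u' := PySem.Str.join " " (PySem.Str.split₀ u ++ [(s :: rest).headD "", "\n"]) with hu'
      have hsplit : PySem.Str.split₀ u' = PySem.Str.split₀ u ++ [s] := by
        rw [hu']
        rw [show (PySem.Str.split₀ u ++ [(s :: rest).headD "", "\n"]) = ((PySem.Str.split₀ u ++ [s]) ++ ["\n"]) by simp]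
        exact pv_resplit _ (by simp) (by
          intro w hw
          rcases List.mem_append.mp hw with h1 | h2
          · exact pv_split₀_good u w h1
          · simpa [List.mem_singleton.mp h2] using hsg)
      rw [ih u']
      cases hm : List.filterMap (fun t => (prots.filter (fun s => PySem.Str.isIn t s)).head?) O with
      | nil => simp [hu']
      | cons m ms =>
        simp only [reduceCtorEq, if_false]
        rw [hsplit]
        simp

def pvStepV (inv cd : PySem.Dict String String) (taxa group v : String) : String :=
  match inv.get? group with
  | none => v
  | some complete_group =>
    match cd.get? complete_group with
    | none => v
    | some cstr =>
      let complete_prots := PySem.Str.split₀ cstr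
      let outgroup_seq := complete_prots.filter (fun seq => PySem.Str.isIn taxa seq)
      if outgroup_seq = [] then v
      else PySem.Str.join " " (PySem.Str.split₀ v ++ [outgroup_seq.headD "", "\n"])

def pvAltV (inv cd : PySem.Dict String String) (outgroups : List String) (group v : String) : String :=
  match inv.get? group with
  | none => v
  | some cg =>
    let prots := PySem.Str.split₀ (cd.getD cg "")
    let matched := outgroups.filterMap (fun taxa => (prots.filter (fun p => PySem.Str.isIn taxa p)).head?)
    if matched = [] then v
    else PySem.Str.join " " (PySem.Str.split₀ v ++ matched ++ ["\n"])

theorem pv_stepv_foldl (inv cd : PySem.Dict String String) (O : List String) (g v : String) :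
    O.foldl (fun v t => pvStepV inv cd t g v) v = pvAltV inv cd O g v := by
  cases hinv : inv.get? g with
  | none =>
    simp only [pvStepV, pvAltV, hinv]
    exact PySem.List.foldl_ignore O v
  | some cg =>
    cases hcd : cd.get? cg with
    | none =>
      simp only [pvStepV, pvAltV, hinv, hcd, PySem.Dict.getD_of_get?_eq_none cd "" hcd]
      rw [show PySem.Str.split₀ "" = [] from rfl]
      simp
    | some cstr =>
      simp only [pvStepV, pvAltV, hinv, hcd, PySem.Dict.getD_of_get?_eq_some cd "" hcd]
      exact pv_foldl_step (PySem.Str.split₀ cstr) (pv_split₀_good cstr) O v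

def pvBodyA (inv cd : PySem.Dict String String) (taxa : String) (bd' : PySem.Dict String String) (group : String) : PySem.Dict String String :=
  match inv.get? group with
  | none => bd'
  | some complete_group =>
    match cd.get? complete_group with
    | none => bd'
    | some cstr =>
      let complete_prots := PySem.Str.split₀ cstr
      let outgroup_seq := complete_prots.filter (fun seq => PySem.Str.isIn taxa seq)
      if outgroup_seq = [] then bd'
      else bd'.insert group
        (PySem.Str.join " " (PySem.Str.split₀ (bd'.getD group "") ++ [outgroup_seq.headD "", "\n"]))

theorem pv_pass_items (inv cd : PySem.Dict String String) (t : String) :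
    ∀ (ks : List String) (e : PySem.Dict String String), e.keys.Nodup → ks.Nodup →
      (∀ k ∈ ks, e.contains k = true) →
      (ks.foldl (pvBodyA inv cd t) e).items
        = e.items.map (fun p => if p.1 ∈ ks then (p.1, pvStepV inv cd t p.1 p.2) else p) := by
  intro ks
  induction ks with
  | nil => intro e _ _ _; simp
  | cons g ks ih =>
    intro e he hnd hcont
    have hgk : g ∉ ks := (List.nodup_cons.mp hnd).1
    have hndk : ks.Nodup := (List.nodup_cons.mp hnd).2
    have hcg : e.contains g = true := hcont g (by simp)
    obtain ⟨v, hv⟩ : ∃ v, e.get? g = some v := by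
      rw [PySem.Dict.contains_eq_isSome_get?] at hcg
      exact Option.isSome_iff_exists.mp hcg
    have hcg : e.contains g = true := hcont g (by simp)
    have huniq : ∀ p ∈ e.items, p.1 = g → p.2 = v := by
      intro p hp hp1
      have := PySem.Dict.get?_of_mem_items e (show (g, p.2) ∈ e.items by rw [← hp1]; exact hp) he
      rw [hv] at this
      exact (Option.some_inj.mp this).symm
    rw [List.foldl_cons]
    have hunchanged : pvBodyA inv cd t e g = e → pvStepV inv cd t g v = v →
        (ks.foldl (pvBodyA inv cd t) e).items
          = e.items.map (fun p => if p.1 ∈ g :: ks then (p.1, pvStepV inv cd t p.1 p.2) else p) := by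
      intro hbody hid
      rw [ih e he hndk (fun k hk => hcont k (by simp [hk]))]
      apply List.map_congr_left
      rintro ⟨p1, p2⟩ hp
      by_cases hpg : p1 = g
      · have hp2 : p2 = v := huniq _ hp hpg
        subst hpg; subst hp2
        simp [hgk, hid]
      · simp [List.mem_cons, hpg]
    cases hinv : inv.get? g with
    | none =>
      have hb : pvBodyA inv cd t e g = e := by simp only [pvBodyA, hinv]
      rw [hb]; exact hunchanged hb (by simp only [pvStepV, hinv])
    | some cg =>
      cases hcd : cd.get? cg with
      | none =>
        have hb : pvBodyA inv cd t e g = e := by simp only [pvBodyA, hinv, hcd]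
        rw [hb]; exact hunchanged hb (by simp only [pvStepV, hinv, hcd])
      | some cstr =>
        by_cases hfil : (PySem.Str.split₀ cstr).filter (fun seq => PySem.Str.isIn t seq) = []
        · have hb : pvBodyA inv cd t e g = e := by
            simp only [pvBodyA, hinv, hcd, hfil, if_true]
          rw [hb]
          exact hunchanged hb (by simp only [pvStepV, hinv, hcd, hfil, if_true])
        · have hgd : e.getD g "" = v := PySem.Dict.getD_of_get?_eq_some e "" hv
          set w := PySem.Str.join " " (PySem.Str.split₀ (e.getD g "") ++
            [((PySem.Str.split₀ cstr).filter (fun seq => PySem.Str.isIn t seq)).headD "", "\n"]) with hwdef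
          have hbody : pvBodyA inv cd t e g = e.insert g w := by
            simp only [pvBodyA, hinv, hcd, hwdef]
            rw [if_neg hfil]
          have hw : pvStepV inv cd t g v = w := by
            simp only [pvStepV, hinv, hcd, hwdef, hgd]
            rw [if_neg hfil]
          have hkeys : (e.insert g w).keys = e.keys := PySem.Dict.keys_insert_of_contains e w hcg
          have hcont' : ∀ k ∈ ks, (e.insert g w).contains k = true := by
            intro k hk
            rw [PySem.Dict.contains_insert]
            simp [hcont k (by simp [hk])]
          rw [hbody, ih (e.insert g w) (hkeys ▸ he) hndk hcont']
          rw [PySem.Dict.items_insert_of_contains e w hcg, List.map_map]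
          apply List.map_congr_left
          rintro ⟨p1, p2⟩ hp
          by_cases hpg : p1 = g
          · have hp2 : p2 = v := huniq _ hp hpg
            subst hpg; subst hp2
            simp [Function.comp, hgk, hw]
          · simp [Function.comp, List.mem_cons, hpg]

theorem pv_passes_items (inv cd : PySem.Dict String String) :
    ∀ (O : List String) (d : PySem.Dict String String), d.keys.Nodup →
      (O.foldl (fun bd taxa => bd.keys.foldl (pvBodyA inv cd taxa) bd) d).items
        = d.items.map (fun p => (p.1, O.foldl (fun v t => pvStepV inv cd t p.1 v) p.2)) := by
  intro O
  induction O with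
  | nil =>
    intro d _
    simp
  | cons t O ih =>
    intro d hnd
    rw [List.foldl_cons]
    have hpass : (d.keys.foldl (pvBodyA inv cd t) d) =
        PySem.Dict.mk (d.items.map (fun p => (p.1, pvStepV inv cd t p.1 p.2))) := by
      apply PySem.Dict.ext
      rw [pv_pass_items inv cd t d.keys d hnd hnd
        (fun k hk => (PySem.Dict.contains_iff_mem_keys d k).mpr hk)]
      have : ∀ p ∈ d.items, p.1 ∈ d.keys := by
        intro p hp
        simp only [PySem.Dict.keys]
        exact List.mem_map_of_mem hp
      calc d.items.map (fun p => if p.1 ∈ d.keys then (p.1, pvStepV inv cd t p.1 p.2) else p)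
          = d.items.map (fun p => (p.1, pvStepV inv cd t p.1 p.2)) :=
            List.map_congr_left (fun p hp => by simp [this p hp])
        _ = (PySem.Dict.mk (d.items.map (fun p => (p.1, pvStepV inv cd t p.1 p.2)))).items := rfl
    rw [hpass]
    have hkeys : (PySem.Dict.mk (d.items.map (fun p => (p.1, pvStepV inv cd t p.1 p.2)))).keys = d.keys := by
      simp only [PySem.Dict.keys, List.map_map]
      rfl
    rw [ih _ (by rw [hkeys]; exact hnd)]
    rw [List.map_map]
    apply List.map_congr_left
    rintro ⟨p1, p2⟩ hp
    simp [Function.comp]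

-- B-side lemmas
theorem pv_collectHits_filterMap (prots : List String) (O : List String) :
    pvCollectHits prots O
      = O.filterMap (fun t => (prots.filter (fun p => PySem.Str.isIn t p)).head?) := by
  have main : ∀ (O : List String) (acc : List String),
      O.foldl (fun hits taxa =>
        match prots.find? (fun p => PySem.Str.isIn taxa p) with
        | some p => hits ++ [p]
        | none => hits) acc
      = acc ++ O.filterMap (fun t => (prots.filter (fun p => PySem.Str.isIn t p)).head?) := by
    intro O
    induction O with
    | nil => intro acc; simp
    | cons t O ih =>
      intro acc
      rw [List.foldl_cons, List.filterMap_cons]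
      rw [show prots.find? (fun p => PySem.Str.isIn t p)
          = (prots.filter (fun p => PySem.Str.isIn t p)).head? from (List.head?_filter ..).symm]
      cases (prots.filter (fun p => PySem.Str.isIn t p)).head? with
      | none => exact ih acc
      | some p => rw [ih (acc ++ [p])]; simp
  exact main O []

theorem pv_update_foldl :
    ∀ (l : List (String × String)) (d : PySem.Dict String String),
      d.update l = l.foldl (fun d kv => d.insert kv.1 kv.2) d := by
  intro l
  induction l with
  | nil => intro d; rfl
  | cons a l ih => intro d; rw [List.foldl_cons, ← ih]; rfl

theorem pv_get?_foldl_insert_map (f : String → List String) :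
    ∀ (l : List (String × String)) (d : PySem.Dict String (List String)) (d' : PySem.Dict String String),
      (∀ x, d.get? x = (d'.get? x).map f) →
      ∀ x, (l.foldl (fun a kv => a.insert kv.2 (f kv.1)) d).get? x
          = ((l.foldl (fun a kv => a.insert kv.2 kv.1) d').get? x).map f := by
  intro l
  induction l with
  | nil => intro d d' h x; exact h x
  | cons kv l ih =>
    intro d d' h x
    rw [List.foldl_cons, List.foldl_cons]
    refine ih _ _ (fun y => ?_) x
    rw [PySem.Dict.get?_insert, PySem.Dict.get?_insert]
    by_cases hy : y = kv.2
    · simp [hy]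
    · simp [hy, h y]

-- additions.get? g = (inv.get? g).map (hits of its complete group)
theorem pv_additions_get? (groups_key : List (String × String)) (cd : PySem.Dict String String) (O : List String) (x : String) :
    ((PySem.Dict.ofList groups_key).items.foldl (fun add kv =>
        add.insert kv.2 (pvCollectHits (PySem.Str.split₀ (cd.getD kv.1 "")) O))
      PySem.Dict.empty).get? x
    = ((PySem.Dict.ofList ((PySem.Dict.ofList groups_key).items.map (fun kv => (kv.2, kv.1)))).get? x).map
        (fun cg => pvCollectHits (PySem.Str.split₀ (cd.getD cg "")) O) := by
  have hinv : PySem.Dict.ofList ((PySem.Dict.ofList groups_key).items.map (fun kv => (kv.2, kv.1)))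
      = (PySem.Dict.ofList groups_key).items.foldl (fun a kv => a.insert kv.2 kv.1) PySem.Dict.empty := by
    show PySem.Dict.empty.update _ = _
    rw [pv_update_foldl, List.foldl_map]
  rw [hinv]
  exact pv_get?_foldl_insert_map (fun cg => pvCollectHits (PySem.Str.split₀ (cd.getD cg "")) O) _ PySem.Dict.empty PySem.Dict.empty (fun y => by simp [PySem.Dict.get?_empty]) x

-- ===== VERDICT (by name: the statement is the Claim_ definition above) =====
theorem fetch_outgroups_spec : Claim_equal_fetch_outgroups := by
  intro Basidio_dic Complete_dic groups_key outgroups _ _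
  show fetch_outgroups Basidio_dic Complete_dic groups_key outgroups
      = fetch_outgroups_alt Basidio_dic Complete_dic groups_key outgroups
  have hA : fetch_outgroups Basidio_dic Complete_dic groups_key outgroups
      = (outgroups.foldl
          (fun bd taxa => bd.keys.foldl
            (pvBodyA (PySem.Dict.ofList ((PySem.Dict.ofList groups_key).items.map (fun kv => (kv.2, kv.1))))
              (PySem.Dict.ofList Complete_dic) taxa) bd)
          (PySem.Dict.ofList Basidio_dic)).items := rfl
  have hB : fetch_outgroups_alt Basidio_dic Complete_dic groups_key outgroups
      = (PySem.Dict.ofList Basidio_dic).items.map (fun gv =>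
          (gv.1,
            match ((PySem.Dict.ofList groups_key).items.foldl (fun add kv =>
                add.insert kv.2 (pvCollectHits (PySem.Str.split₀ ((PySem.Dict.ofList Complete_dic).getD kv.1 "")) outgroups))
              PySem.Dict.empty).get? gv.1 with
            | some (h :: t) => PySem.Str.join " " (PySem.Str.split₀ gv.2 ++ (h :: t) ++ ["\n"])
            | _ => gv.2)) := rfl
  rw [hA, hB, pv_passes_items _ _ outgroups _ (PySem.Dict.nodup_keys_ofList Basidio_dic)]
  apply List.map_congr_left
  rintro ⟨p1, p2⟩ _
  rw [pv_stepv_foldl]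
  refine congrArg (Prod.mk p1) ?_
  rw [pv_additions_get? groups_key (PySem.Dict.ofList Complete_dic) outgroups p1]
  cases hinv : (PySem.Dict.ofList ((PySem.Dict.ofList groups_key).items.map (fun kv => (kv.2, kv.1)))).get? p1 with
  | none => simp only [pvAltV, hinv, Option.map_none]
  | some cg =>
    simp only [pvAltV, hinv, Option.map_some, pv_collectHits_filterMap]
    cases hm : outgroups.filterMap
        (fun taxa => ((PySem.Str.split₀ ((PySem.Dict.ofList Complete_dic).getD cg "")).filter
          (fun p => PySem.Str.isIn taxa p)).head?) with
    | nil => simp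
    | cons h t => simp
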